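-- pv_equiv track=rewrite | github.com/leonore/twitter-parser | networks.py | hashtag_network_statistics
-- ===== SOURCE A (Python) =====
-- import itertools
--
-- def hashtag_network_statistics(hashtags):
--     """
--     Function to get ties/triads information from a hashtag network
--     :hashtag -> nested lists of hashtags obtained with hashtag_interaction()
--     """
--     ties = 0
--     visited = []
--     triads = 0
--     for tag_list in hashtags:
--         # single used hashtags aren't used in conjuction with others
--         if len(tag_list) > 1:
--             # we don't want to count duplicates ties or triads
--             if tag_list not in visited:
--                 if len(tag_list) > 1:
--                     if len(tag_list) >= 2:
--                         ties += sum(1 for ignore in itertools.combinations(tag_list, 2))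
--                     if len(tag_list) > 2:
--                         triads += sum(1 for ignore in itertools.combinations(tag_list, 3))
--                 for h in tag_list:
--                     for other in tag_list:
--                         if h != other:
--                             for visited_list in visited:
--                                 if other in visited_list:
--                                     triads += len(visited_list)-1
--                 visited.append(tag_list)
--
--     return ties, triads
-- ===== SOURCE B (Python) =====
-- def hashtag_network_statistics(hashtags):
--     # faster: closed-form tie/triad counts and an incrementally maintained
--     # weight dict replace the per-pair scan over all previously visited lists
--     ties = 0
--     triads = 0
--     seen = set()
--     weight = {}  # tag -> sum of (len(v) - 1) over distinct visited lists v containing tag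
--     for tag_list in hashtags:
--         n = len(tag_list)
--         if n > 1:
--             key = tuple(tag_list)
--             if key not in seen:
--                 ties += n * (n - 1) // 2
--                 triads += n * (n - 1) * (n - 2) // 6
--                 for h in tag_list:
--                     for other in tag_list:
--                         if h != other:
--                             triads += weight.get(other, 0)
--                 seen.add(key)
--                 for h in dict.fromkeys(tag_list):
--                     weight[h] = weight.get(h, 0) + (n - 1)
--     return ties, triads
-- ===== Notes on version B (the rewrite author's own statement) =====
-- stated objective: faster
-- what changed: B replaces A's innermost scan over all previously visited lists (per ordered tag pair) with an incrementally maintained per-tag weight dict and a seen-set, and replaces the itertools.combinations enumerations with closed-form binomial counts.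
import Mathlib
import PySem

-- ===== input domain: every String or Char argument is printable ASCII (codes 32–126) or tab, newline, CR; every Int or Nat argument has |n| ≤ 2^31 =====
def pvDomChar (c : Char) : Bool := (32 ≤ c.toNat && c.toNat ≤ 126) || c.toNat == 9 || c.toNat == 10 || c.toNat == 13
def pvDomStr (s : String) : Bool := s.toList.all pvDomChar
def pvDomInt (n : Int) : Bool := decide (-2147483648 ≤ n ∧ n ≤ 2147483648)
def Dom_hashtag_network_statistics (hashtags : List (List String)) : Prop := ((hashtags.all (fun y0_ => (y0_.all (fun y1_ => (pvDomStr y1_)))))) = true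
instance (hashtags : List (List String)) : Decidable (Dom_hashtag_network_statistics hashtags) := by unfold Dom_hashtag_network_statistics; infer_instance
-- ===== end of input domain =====

-- B replaces A's per-pair scan over all previously visited lists by an incrementally
-- maintained weight dict (and the combination counts by closed forms): asymptotically faster.

-- ===== PORT A =====
-- one iteration of A's `for tag_list in hashtags` loop; state = (ties, visited, triads)
def pvStepA (st : Int × List (List String) × Int) (tag_list : List String) :
    Int × List (List String) × Int :=
  let ties := st.1
  let visited := st.2.1
  let triads := st.2.2
  if tag_list.length > 1 then
    if tag_list ∈ visited then (ties, visited, triads)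
    else
      -- `sum(1 for _ in itertools.combinations(l, k))` = number of length-k combinations
      let ties := if tag_list.length > 1 then
          (if tag_list.length ≥ 2 then ties + ((List.sublistsLen 2 tag_list).length : Int) else ties)
        else ties
      let triads := if tag_list.length > 1 then
          (if tag_list.length > 2 then triads + ((List.sublistsLen 3 tag_list).length : Int) else triads)
        else triads
      let triads := tag_list.foldl (fun tr h =>
        tag_list.foldl (fun tr other =>
          if h ≠ other then
            visited.foldl (fun tr vl =>
              if other ∈ vl then tr + ((vl.length : Int) - 1) else tr) tr
          else tr) tr) triads
      (ties, visited ++ [tag_list], triads)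
  else (ties, visited, triads)

def hashtag_network_statistics (hashtags : List (List String)) : Int × Int :=
  let st := hashtags.foldl pvStepA (0, [], 0)
  (st.1, st.2.2)

-- ===== PORT B =====
-- one iteration of B's loop; state = (ties, triads, seen, weight)
def pvStepB (st : Int × Int × PySem.Set (List String) × PySem.Dict String Int)
    (tag_list : List String) :
    Int × Int × PySem.Set (List String) × PySem.Dict String Int :=
  let ties := st.1
  let triads := st.2.1
  let seen := st.2.2.1
  let weight := st.2.2.2
  let n : Int := tag_list.length
  if n > 1 then
    if PySem.Set.contains seen tag_list then (ties, triads, seen, weight)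
    else
      let ties := ties + PySem.Int.floordiv (n * (n - 1)) 2
      let triads := triads + PySem.Int.floordiv (n * (n - 1) * (n - 2)) 6
      let triads := tag_list.foldl (fun tr h =>
        tag_list.foldl (fun tr other =>
          if h ≠ other then tr + weight.getD other 0 else tr) tr) triads
      let seen := PySem.Set.add seen tag_list
      let weight := (PySem.List.dedup tag_list).foldl
        (fun w h => w.insert h (w.getD h 0 + (n - 1))) weight
      (ties, triads, seen, weight)
  else (ties, triads, seen, weight)

def hashtag_network_statistics_alt (hashtags : List (List String)) : Int × Int :=
  let st := hashtags.foldl pvStepB (0, 0, PySem.Set.empty, PySem.Dict.empty)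
  (st.1, st.2.1)

-- ===== PRECONDITION & SPEC =====
def Spec_hashtag_network_statistics (hashtags : List (List String)) (out : Int × Int) : Prop := out = hashtag_network_statistics_alt hashtags
instance (hashtags : List (List String)) (out : Int × Int) : Decidable (Spec_hashtag_network_statistics hashtags out) := by unfold Spec_hashtag_network_statistics; infer_instance

-- ===== CLAIM (what is proved, stated in full; the proofs are below) =====
def Claim_equal_hashtag_network_statistics : Prop := ∀ (hashtags : List (List String)), Dom_hashtag_network_statistics hashtags → Spec_hashtag_network_statistics hashtags (hashtag_network_statistics hashtags)

-- ===== LEMMAS AND PROOFS =====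

-- total weight of a tag over the visited lists (what A's innermost scan accumulates)
def pvW (vis : List (List String)) (x : String) : Int :=
  (vis.map (fun vl => if x ∈ vl then ((vl.length : Int) - 1) else 0)).sum

lemma pvW_append (vis : List (List String)) (tl : List String) (x : String) :
    pvW (vis ++ [tl]) x = pvW vis x + (if x ∈ tl then ((tl.length : Int) - 1) else 0) := by
  simp [pvW]

lemma scanA_eq (vis : List (List String)) (x : String) (tr : Int) :
    vis.foldl (fun tr vl => if x ∈ vl then tr + ((vl.length : Int) - 1) else tr) tr
      = tr + pvW vis x := by
  induction vis generalizing tr with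
  | nil => simp [pvW]
  | cons vl rest ih =>
    simp only [List.foldl_cons, ih, pvW, List.map_cons, List.sum_cons]
    split <;> ring

lemma choose2_int (n : ℕ) : ((n.choose 2 : ℕ) : Int) * 2 = (n : Int) * ((n : Int) - 1) := by
  induction n with
  | zero => simp
  | succ n ih =>
    rw [Nat.choose_succ_succ, Nat.choose_one_right]
    push_cast
    linear_combination ih

lemma choose3_int (n : ℕ) : ((n.choose 3 : ℕ) : Int) * 6 = (n : Int) * ((n : Int) - 1) * ((n : Int) - 2) := by
  induction n with
  | zero => simp
  | succ n ih =>
    rw [Nat.choose_succ_succ]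
    push_cast
    linear_combination 3 * choose2_int n + ih

lemma comb2_eq (tl : List String) :
    ((List.sublistsLen 2 tl).length : Int)
      = PySem.Int.floordiv ((tl.length : Int) * ((tl.length : Int) - 1)) 2 := by
  rw [List.length_sublistsLen]
  have h := choose2_int tl.length
  rw [eq_comm, PySem.Int.floordiv_eq_iff_of_pos (by norm_num)]
  constructor <;> nlinarith [h]

lemma comb3_eq (tl : List String) :
    ((List.sublistsLen 3 tl).length : Int)
      = PySem.Int.floordiv ((tl.length : Int) * ((tl.length : Int) - 1) * ((tl.length : Int) - 2)) 6 := by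
  rw [List.length_sublistsLen]
  have h := choose3_int tl.length
  rw [eq_comm, PySem.Int.floordiv_eq_iff_of_pos (by norm_num)]
  constructor <;> nlinarith [h]

-- B's weight-update loop, pointwise
lemma getD_update_loop (l : List String) (hl : l.Nodup) (w : PySem.Dict String Int)
    (c : Int) (x : String) :
    ((l.foldl (fun w h => w.insert h (w.getD h 0 + c)) w).getD x 0)
      = w.getD x 0 + (if x ∈ l then c else 0) := by
  induction l generalizing w with
  | nil => simp
  | cons h t ih =>
    have hnd := hl
    rw [List.nodup_cons] at hnd
    simp only [List.foldl_cons]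
    rw [ih hnd.2]
    by_cases hx : x = h
    · subst hx
      rw [PySem.Dict.getD_insert]
      simp [hnd.1]
    · rw [PySem.Dict.getD_insert]
      simp [hx]

-- the invariant tying A's state to B's state
def pvInv (a : Int × List (List String) × Int)
    (b : Int × Int × PySem.Set (List String) × PySem.Dict String Int) : Prop :=
  a.1 = b.1 ∧ a.2.2 = b.2.1 ∧ a.2.1 = b.2.2.1 ∧ ∀ x, b.2.2.2.getD x 0 = pvW a.2.1 x

lemma pvStep_inv (a : Int × List (List String) × Int)
    (b : Int × Int × PySem.Set (List String) × PySem.Dict String Int)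
    (h : pvInv a b) (tl : List String) : pvInv (pvStepA a tl) (pvStepB b tl) := by
  obtain ⟨ht, htr, hv, hw⟩ := h
  obtain ⟨tA, visA, trA⟩ := a
  obtain ⟨tB, trB, seen, w⟩ := b
  simp only at ht htr hv hw
  subst ht htr hv
  by_cases hlen : tl.length > 1
  · have hlen' : (tl.length : Int) > 1 := by exact_mod_cast hlen
    by_cases hmem : tl ∈ visA
    · simp [pvStepA, pvStepB, hlen, hlen', hmem,
        (PySem.Set.contains_iff visA tl).mpr hmem, pvInv, hw]
    · have hcon : PySem.Set.contains visA tl = false := by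
        rw [← Bool.not_eq_true, PySem.Set.contains_iff]; exact hmem
      have h2 : tl.length ≥ 2 := hlen
      simp only [pvStepA, pvStepB, if_pos hlen, if_pos hlen', if_neg hmem, hcon,
        Bool.false_eq_true, if_false, if_pos h2]
      refine ⟨?_, ?_, ?_, ?_⟩
      · -- ties
        rw [comb2_eq]
      · -- triads
        have hdbl : (fun (tr : Int) h =>
            tl.foldl (fun tr other =>
              if h ≠ other then
                visA.foldl (fun tr vl => if other ∈ vl then tr + ((vl.length : Int) - 1) else tr) tr
              else tr) tr)
          = (fun (tr : Int) h =>
            tl.foldl (fun tr other => if h ≠ other then tr + w.getD other 0 else tr) tr) := by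
          funext tr h
          congr 1
          funext tr other
          by_cases hne : h ≠ other
          · simp only [scanA_eq, hw]
          · simp [hne]
        rw [hdbl]
        by_cases h3 : tl.length > 2
        · rw [if_pos h3, comb3_eq]
        · have hn2 : tl.length = 2 := by omega
          rw [if_neg h3, hn2]
          norm_num [PySem.Int.floordiv]
      · -- visited / seen
        simp [PySem.Set.add, hmem]
      · -- weight
        intro x
        rw [getD_update_loop _ (PySem.List.nodup_dedup tl) w _ x, hw, pvW_append]
        congr 1
        simp
  · have hlen' : ¬ ((tl.length : Int) > 1) := by exact_mod_cast hlen
    simp [pvStepA, pvStepB, hlen, hlen', pvInv, hw]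

lemma fold_inv (hashtags : List (List String))
    (a : Int × List (List String) × Int)
    (b : Int × Int × PySem.Set (List String) × PySem.Dict String Int)
    (h : pvInv a b) :
    pvInv (hashtags.foldl pvStepA a) (hashtags.foldl pvStepB b) := by
  induction hashtags generalizing a b with
  | nil => exact h
  | cons tl rest ih => exact ih _ _ (pvStep_inv a b h tl)

-- ===== VERDICT (by name: the statement is the Claim_ definition above) =====
theorem hashtag_network_statistics_spec : Claim_equal_hashtag_network_statistics := by
  intro hashtags _
  unfold Spec_hashtag_network_statistics hashtag_network_statistics hashtag_network_statistics_alt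
  have h := fold_inv hashtags (0, [], 0) (0, 0, PySem.Set.empty, PySem.Dict.empty)
    ⟨rfl, rfl, rfl, fun x => rfl⟩
  obtain ⟨h1, h2, _, _⟩ := h
  simp only [h1, h2]
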